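-- pv_equiv track=rewrite | github.com/tonynagyy/Midterm-project-AI-agents | neo4j-chatbot/agent/cypher_generator.py | _matches_intent_shape
-- ===== SOURCE A (Python) =====
-- def _matches_intent_shape(query: str, intent: str) -> bool:
--     q_upper = query.upper()
--
--     if intent == "inquire":
--         forbidden = ("DELETE", "DETACH DELETE", "MERGE", "CREATE", "SET")
--         return not any(token in q_upper for token in forbidden)
--
--     if intent == "add":
--         return "MERGE" in q_upper and "DELETE" not in q_upper
--
--     if intent == "update":
--         return "MERGE" in q_upper and "DELETE" in q_upper
--
--     if intent == "delete":
--         return "DELETE" in q_upper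
--
--     return True
-- ===== SOURCE B (Python) =====
-- def _matches_intent_shape(query: str, intent: str) -> bool:
--     q = query.upper()
--     present = set()
--     for i in range(len(q)):
--         for t in ("DELETE", "MERGE", "CREATE", "SET"):
--             if q.startswith(t, i):
--                 present.add(t)
--     m = "MERGE" in present
--     d = "DELETE" in present
--     return {"inquire": not present, "add": m and not d,
--             "update": m and d, "delete": d}.get(intent, True)
-- ===== Notes on version B (the rewrite author's own statement) =====
-- stated objective: alternative
-- what changed: Instead of running a separate substring search per intent-relevant token, B does one left-to-right scan of the uppercased query that collects the set of mutation tokens present (checking all four patterns at each position), then decides every intent from that one set via a lookup table; the redundant 'DETACH DELETE' token (subsumed by 'DELETE') disappears.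
import Mathlib
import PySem

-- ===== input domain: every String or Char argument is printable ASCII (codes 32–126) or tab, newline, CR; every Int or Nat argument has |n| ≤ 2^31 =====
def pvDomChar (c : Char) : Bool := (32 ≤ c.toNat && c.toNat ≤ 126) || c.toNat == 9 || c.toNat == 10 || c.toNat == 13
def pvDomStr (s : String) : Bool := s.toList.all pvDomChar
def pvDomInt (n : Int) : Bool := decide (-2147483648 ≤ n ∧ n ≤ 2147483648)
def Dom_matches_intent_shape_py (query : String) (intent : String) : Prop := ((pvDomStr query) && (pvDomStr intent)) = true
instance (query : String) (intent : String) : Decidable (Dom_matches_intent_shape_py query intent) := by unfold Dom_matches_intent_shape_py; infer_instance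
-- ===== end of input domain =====

-- B replaces A's per-intent substring tests by one left-to-right multi-pattern scan of the
-- uppercased query that collects the set of mutation tokens present, then decides every
-- intent from that one set via a lookup table (alternative decomposition, same cost).

-- ===== PORT A =====
def matches_intent_shape_py (query : String) (intent : String) : Bool :=
  let q_upper := PySem.Str.upper query
  if intent == "inquire" then
    let forbidden : List String := ["DELETE", "DETACH DELETE", "MERGE", "CREATE", "SET"]
    !(forbidden.any (fun token => PySem.Str.isIn token q_upper))
  else if intent == "add" then
    PySem.Str.isIn "MERGE" q_upper && !(PySem.Str.isIn "DELETE" q_upper)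
  else if intent == "update" then
    PySem.Str.isIn "MERGE" q_upper && PySem.Str.isIn "DELETE" q_upper
  else if intent == "delete" then
    PySem.Str.isIn "DELETE" q_upper
  else
    true

-- ===== PORT B =====
-- the token tuple of Source B's inner loop, as literal char lists
def pvScanTokens : List (List Char) :=
  ["DELETE".toList, "MERGE".toList, "CREATE".toList, "SET".toList]

-- q.startswith(t, i) for 0 ≤ i ≤ len(q): exact as take/drop comparison on the char list
def pvStartsAt (q : List Char) (i : Nat) (t : List Char) : Bool :=
  (q.drop i).take t.length == t

def matches_intent_shape_py_alt (query : String) (intent : String) : Bool :=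
  let q := PySem.Chars.upper query.toList
  -- for i in range(len(q)): for t in tokens: if q.startswith(t, i): present.add(t)
  let present : PySem.Set (List Char) :=
    (List.range q.length).foldl (fun acc i =>
      pvScanTokens.foldl (fun acc t =>
        if pvStartsAt q i t then PySem.Set.add acc t else acc) acc)
      PySem.Set.empty
  let m := PySem.Set.contains present "MERGE".toList
  let d := PySem.Set.contains present "DELETE".toList
  let table : PySem.Dict String Bool :=
    ((((PySem.Dict.empty).insert "inquire" present.isEmpty).insert
        "add" (m && !d)).insert
        "update" (m && d)).insert
        "delete" d
  PySem.Dict.getD table intent true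

-- ===== PRECONDITION & SPEC =====
def Spec_matches_intent_shape_py (query : String) (intent : String) (out : Bool) : Prop := out = matches_intent_shape_py_alt query intent
instance (query : String) (intent : String) (out : Bool) : Decidable (Spec_matches_intent_shape_py query intent out) := by unfold Spec_matches_intent_shape_py; infer_instance

-- ===== CLAIM (what is proved, stated in full; the proofs are below) =====
def Claim_equal_matches_intent_shape_py : Prop := ∀ (query : String) (intent : String), Dom_matches_intent_shape_py query intent → Spec_matches_intent_shape_py query intent (matches_intent_shape_py query intent)

-- ===== LEMMAS AND PROOFS =====

-- proof-side name for B's scanned token set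
def pvPresent (query : String) : PySem.Set (List Char) :=
  (List.range (PySem.Chars.upper query.toList).length).foldl (fun acc i =>
    pvScanTokens.foldl (fun acc t =>
      if pvStartsAt (PySem.Chars.upper query.toList) i t then PySem.Set.add acc t else acc) acc)
    PySem.Set.empty

-- membership after the inner token loop
theorem mem_inner_foldl (ts : List (List Char)) (p : List Char → Bool)
    (acc : PySem.Set (List Char)) (x : List Char) :
    (x ∈ ts.foldl (fun acc t => if p t then PySem.Set.add acc t else acc) acc) ↔
      x ∈ acc ∨ (x ∈ ts ∧ p x = true) := by
  induction ts generalizing acc with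
  | nil => simp
  | cons t ts ih =>
    simp only [List.foldl_cons]
    rw [ih]
    by_cases hp : p t = true
    · rw [if_pos hp]
      simp only [PySem.Set.mem_add, List.mem_cons]
      constructor
      · rintro ((h | rfl) | h)
        · exact Or.inl h
        · exact Or.inr ⟨Or.inl rfl, hp⟩
        · exact Or.inr ⟨Or.inr h.1, h.2⟩
      · rintro (h | ⟨(rfl | h), hx⟩)
        · exact Or.inl (Or.inl h)
        · exact Or.inl (Or.inr rfl)
        · exact Or.inr ⟨h, hx⟩
    · rw [if_neg hp]
      simp only [List.mem_cons]
      constructor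
      · rintro (h | h)
        · exact Or.inl h
        · exact Or.inr ⟨Or.inr h.1, h.2⟩
      · rintro (h | ⟨(rfl | h), hx⟩)
        · exact Or.inl h
        · exact absurd hx hp
        · exact Or.inr ⟨h, hx⟩

-- membership after the outer index loop
theorem mem_outer_foldl (is : List Nat) (q : List Char)
    (acc : PySem.Set (List Char)) (x : List Char) :
    (x ∈ is.foldl (fun acc i =>
        pvScanTokens.foldl (fun acc t =>
          if pvStartsAt q i t then PySem.Set.add acc t else acc) acc) acc) ↔
      x ∈ acc ∨ (x ∈ pvScanTokens ∧ ∃ i ∈ is, pvStartsAt q i x = true) := by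
  induction is generalizing acc with
  | nil => simp
  | cons i is ih =>
    simp only [List.foldl_cons, ih, mem_inner_foldl]
    constructor
    · rintro ((h | ⟨ht, hp⟩) | ⟨ht, j, hj, hp⟩)
      · exact Or.inl h
      · exact Or.inr ⟨ht, i, by simp, hp⟩
      · exact Or.inr ⟨ht, j, by simp [hj], hp⟩
    · rintro (h | ⟨ht, j, hj, hp⟩)
      · exact Or.inl (Or.inl h)
      · rcases List.mem_cons.1 hj with rfl | hj
        · exact Or.inl (Or.inr ⟨ht, hp⟩)
        · exact Or.inr ⟨ht, j, hj, hp⟩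

-- a nonempty token matches at some scanned index iff it is an infix
theorem startsAt_iff_infix (q t : List Char) (ht : t ≠ []) :
    (∃ i ∈ List.range q.length, pvStartsAt q i t = true) ↔ t <:+: q := by
  constructor
  · rintro ⟨i, _, hp⟩
    simp only [pvStartsAt, beq_iff_eq] at hp
    exact List.IsInfix.trans (hp ▸ (q.drop i).take_prefix t.length).isInfix
      (q.drop_suffix i).isInfix
  · intro hinf
    rcases List.infix_iff_prefix_suffix.1 hinf with ⟨l, hpre, hsuf⟩
    obtain ⟨i, rfl⟩ : ∃ i, l = q.drop i := ⟨q.length - l.length, by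
      rcases hsuf with ⟨u, rfl⟩; simp⟩
    refine ⟨i, ?_, ?_⟩
    · simp only [List.mem_range]
      by_contra h
      have : q.drop i = [] := List.drop_eq_nil_of_le (by omega)
      rw [this] at hpre
      exact ht (List.prefix_nil.1 hpre)
    · simp only [pvStartsAt, beq_iff_eq]
      exact (List.prefix_iff_eq_take.1 hpre).symm

-- token membership in the scanned set = substring containment in the uppercased query
theorem mem_present_iff (query : String) (t : List Char) :
    t ∈ pvPresent query ↔ t ∈ pvScanTokens ∧ t <:+: PySem.Chars.upper query.toList := by
  unfold pvPresent
  rw [mem_outer_foldl]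
  have ht : t ∈ pvScanTokens → t ≠ [] := by
    intro h; fin_cases h <;> decide
  constructor
  · rintro (h | ⟨hm, hex⟩)
    · exact absurd h (by simp [PySem.Set.empty])
    · exact ⟨hm, (startsAt_iff_infix _ _ (ht hm)).1 hex⟩
  · rintro ⟨hm, hinf⟩
    exact Or.inr ⟨hm, (startsAt_iff_infix _ _ (ht hm)).2 hinf⟩

-- A's isIn test for a scanned token equals B's set membership
theorem isIn_eq_contains (query : String) (t : String) (ht : t.toList ∈ pvScanTokens) :
    PySem.Str.isIn t (PySem.Str.upper query) =
      PySem.Set.contains (pvPresent query) t.toList := by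
  rw [Bool.eq_iff_iff]
  simp only [PySem.Set.contains, List.contains_eq_mem, decide_eq_true_eq]
  rw [mem_present_iff]
  simp [PySem.Chars.isIn_iff_infix, ht]

-- "DETACH DELETE" in q implies "DELETE" in q: the shorter token is an infix of the longer.
theorem detach_delete_subsumed (q : String) (h : PySem.Str.isIn "DETACH DELETE" q = true) :
    PySem.Str.isIn "DELETE" q = true := by
  rw [PySem.Str.isIn_iff_infix] at h ⊢
  exact List.IsInfix.trans (by decide) h

-- the scanned set is empty iff none of the four tokens occurs in the uppercased query
theorem present_empty_iff (query : String) :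
    (pvPresent query).isEmpty = true ↔
      ∀ t ∈ pvScanTokens, ¬ t <:+: PySem.Chars.upper query.toList := by
  rw [List.isEmpty_iff, List.eq_nil_iff_forall_not_mem]
  constructor
  · intro h t ht hc
    exact h t ((mem_present_iff query t).2 ⟨ht, hc⟩)
  · intro h t hc
    rcases (mem_present_iff query t).1 hc with ⟨ht, hinf⟩
    exact h t ht hinf

-- reduction of B's table lookup at each known intent (the lookup compares literal keys only)
theorem alt_inquire (query : String) :
    matches_intent_shape_py_alt query "inquire" = (pvPresent query).isEmpty := rfl

theorem alt_add (query : String) :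
    matches_intent_shape_py_alt query "add" =
      (PySem.Set.contains (pvPresent query) "MERGE".toList &&
        !PySem.Set.contains (pvPresent query) "DELETE".toList) := rfl

theorem alt_update (query : String) :
    matches_intent_shape_py_alt query "update" =
      (PySem.Set.contains (pvPresent query) "MERGE".toList &&
        PySem.Set.contains (pvPresent query) "DELETE".toList) := rfl

theorem alt_delete (query : String) :
    matches_intent_shape_py_alt query "delete" =
      PySem.Set.contains (pvPresent query) "DELETE".toList := rfl

theorem alt_other (query intent : String) (h1 : intent ≠ "inquire") (h2 : intent ≠ "add")
    (h3 : intent ≠ "update") (h4 : intent ≠ "delete") :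
    matches_intent_shape_py_alt query intent = true := by
  unfold matches_intent_shape_py_alt
  simp [PySem.Dict.getD, PySem.Dict.get?_insert, h1, h2, h3, h4, PySem.Dict.get?_empty]

-- ===== VERDICT (by name: the statement is the Claim_ definition above) =====
theorem matches_intent_shape_py_spec : Claim_equal_matches_intent_shape_py := by
  intro query intent _
  unfold Spec_matches_intent_shape_py
  by_cases h1 : intent = "inquire"
  · subst h1
    rw [alt_inquire, Bool.eq_iff_iff, present_empty_iff]
    have hiff : ∀ (s : String), PySem.Str.isIn s (PySem.Str.upper query) = true ↔
        s.toList <:+: PySem.Chars.upper query.toList := by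
      intro s
      rw [PySem.Str.isIn_iff_infix]
      simp
    simp only [matches_intent_shape_py, beq_self_eq_true, if_true, List.any_cons,
      List.any_nil, Bool.or_false, Bool.not_eq_true', Bool.or_eq_false_iff]
    constructor
    · rintro ⟨hDel, _, hMer, hCre, hSet⟩ t ht
      have neg : ∀ (s : String), PySem.Str.isIn s (PySem.Str.upper query) = false →
          ¬ s.toList <:+: PySem.Chars.upper query.toList := by
        intro s hs hc
        rw [(hiff s).2 hc] at hs
        exact absurd hs (by simp)
      fin_cases ht
      · exact neg "DELETE" hDel
      · exact neg "MERGE" hMer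
      · exact neg "CREATE" hCre
      · exact neg "SET" hSet
    · intro h
      have pos : ∀ (s : String), s.toList ∈ pvScanTokens →
          PySem.Str.isIn s (PySem.Str.upper query) = false := by
        intro s hs
        rw [Bool.eq_false_iff, Ne, hiff]
        exact h s.toList hs
      have hDel := pos "DELETE" (by decide)
      have hDet : PySem.Str.isIn "DETACH DELETE" (PySem.Str.upper query) = false := by
        rw [Bool.eq_false_iff, Ne]
        intro ht
        rw [detach_delete_subsumed _ ht] at hDel
        exact absurd hDel (by simp)
      exact ⟨hDel, hDet, pos "MERGE" (by decide), pos "CREATE" (by decide),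
        pos "SET" (by decide)⟩
  · by_cases h2 : intent = "add"
    · subst h2
      rw [alt_add, ← isIn_eq_contains query "MERGE" (by decide),
        ← isIn_eq_contains query "DELETE" (by decide)]
      simp [matches_intent_shape_py]
    · by_cases h3 : intent = "update"
      · subst h3
        rw [alt_update, ← isIn_eq_contains query "MERGE" (by decide),
          ← isIn_eq_contains query "DELETE" (by decide)]
        simp [matches_intent_shape_py]
      · by_cases h4 : intent = "delete"
        · subst h4
          rw [alt_delete, ← isIn_eq_contains query "DELETE" (by decide)]
          simp [matches_intent_shape_py]
        · rw [alt_other query intent h1 h2 h3 h4]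
          simp [matches_intent_shape_py, h1, h2, h3, h4]
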